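-- pv_equiv track=rewrite | github.com/masiarek/starvote | sim_total_divergence3.py | get_condorcet_winner
-- ===== SOURCE A (Python) =====
-- def get_condorcet_winner(ballots, candidates):
--     for cand in candidates:
--         beaten_all = True
--         for opp in candidates:
--             if cand == opp:
--                 continue
--             c_wins = sum(1 for b in ballots if b.get(cand, 0) > b.get(opp, 0))
--             o_wins = sum(1 for b in ballots if b.get(opp, 0) > b.get(cand, 0))
--             if not (c_wins > o_wins):
--                 beaten_all = False
--                 break
--         if beaten_all:
--             return cand
--     return None
-- ===== SOURCE B (Python) =====
-- def get_condorcet_winner(ballots, candidates):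
--     # Build the full pairwise win-count matrix in a single pass over the ballots,
--     # then pick the first candidate that beats every other candidate pairwise.
--     wins = {}
--     for b in ballots:
--         scores = [(c, b.get(c, 0)) for c in candidates]
--         for c, sc in scores:
--             for o, so in scores:
--                 if sc > so:
--                     wins[(c, o)] = wins.get((c, o), 0) + 1
--     for cand in candidates:
--         if all(cand == opp or wins.get((cand, opp), 0) > wins.get((opp, cand), 0)
--                for opp in candidates):
--             return cand
--     return None
-- ===== Notes on version B (the rewrite author's own statement) =====
-- stated objective: alternative
-- what changed: B precomputes the full pairwise win-count matrix in one pass over the ballots and then checks each candidate against the matrix, instead of A's re-scanning all ballots twice for every (candidate, opponent) pair with an early break.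
import Mathlib
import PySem

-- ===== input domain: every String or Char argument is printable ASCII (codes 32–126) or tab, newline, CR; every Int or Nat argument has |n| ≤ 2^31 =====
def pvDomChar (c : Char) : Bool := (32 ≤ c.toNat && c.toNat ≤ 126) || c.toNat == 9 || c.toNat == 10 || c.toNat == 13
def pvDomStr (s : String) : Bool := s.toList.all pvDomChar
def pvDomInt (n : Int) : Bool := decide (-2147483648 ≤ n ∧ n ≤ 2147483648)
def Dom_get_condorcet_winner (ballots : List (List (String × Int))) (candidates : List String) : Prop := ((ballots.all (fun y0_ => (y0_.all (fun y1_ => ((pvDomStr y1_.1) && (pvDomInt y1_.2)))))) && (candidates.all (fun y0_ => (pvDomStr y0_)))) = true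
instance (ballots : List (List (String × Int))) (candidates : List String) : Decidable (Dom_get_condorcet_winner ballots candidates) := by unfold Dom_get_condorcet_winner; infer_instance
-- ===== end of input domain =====

-- B builds the pairwise win-count matrix in one ballot pass, then checks each candidate against it,
-- instead of A's two ballot scans per (candidate, opponent) pair (objective: alternative algorithm).

-- ===== PORT A =====
-- sum(1 for b in ballots if b.get(x, 0) > b.get(y, 0))
def pvSumGT (ballots : List (List (String × Int))) (x y : String) : Int :=
  ballots.foldl (fun acc b =>
    if (PySem.Dict.mk b).getD y 0 < (PySem.Dict.mk b).getD x 0 then acc + 1 else acc) 0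

-- inner 'for opp in candidates' loop with its break / beaten_all flag
def pvAInner (ballots : List (List (String × Int))) (cand : String) : List String → Bool
  | [] => true
  | opp :: rest =>
    if cand == opp then pvAInner ballots cand rest
    else
      let c_wins := pvSumGT ballots cand opp
      let o_wins := pvSumGT ballots opp cand
      if ¬ (o_wins < c_wins) then false
      else pvAInner ballots cand rest

-- outer 'for cand in candidates' loop with its early return
def pvAOuter (ballots : List (List (String × Int))) (candidates : List String) : List String → Option String
  | [] => none
  | cand :: rest =>
    if pvAInner ballots cand candidates then some cand else pvAOuter ballots candidates rest

def get_condorcet_winner (ballots : List (List (String × Int))) (candidates : List String) : Option String :=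
  pvAOuter ballots candidates candidates

-- ===== PORT B =====
-- the single ballot pass building the win-count matrix wins[(c, o)]
def pvBMatrix (ballots : List (List (String × Int))) (candidates : List String) :
    PySem.Dict (String × String) Int :=
  ballots.foldl (fun w b =>
    let scores := candidates.map (fun c => (c, (PySem.Dict.mk b).getD c 0))
    scores.foldl (fun w p =>
      scores.foldl (fun w q =>
        if q.2 < p.2 then w.insert (p.1, q.1) (w.getD (p.1, q.1) 0 + 1) else w) w) w)
    PySem.Dict.empty

-- all(cand == opp or wins.get((cand, opp), 0) > wins.get((opp, cand), 0) for opp in candidates)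
def pvBCheck (wins : PySem.Dict (String × String) Int) (candidates : List String) (cand : String) : Bool :=
  candidates.all (fun opp =>
    cand == opp || decide (wins.getD (opp, cand) 0 < wins.getD (cand, opp) 0))

def get_condorcet_winner_alt (ballots : List (List (String × Int))) (candidates : List String) : Option String :=
  let wins := pvBMatrix ballots candidates
  candidates.find? (fun cand => pvBCheck wins candidates cand)

-- ===== PRECONDITION & SPEC =====
def Spec_get_condorcet_winner (ballots : List (List (String × Int))) (candidates : List String) (out : Option String) : Prop := out = get_condorcet_winner_alt ballots candidates
instance (ballots : List (List (String × Int))) (candidates : List String) (out : Option String) : Decidable (Spec_get_condorcet_winner ballots candidates out) := by unfold Spec_get_condorcet_winner; infer_instance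

-- ===== CLAIM (what is proved, stated in full; the proofs are below) =====
def Claim_equal_get_condorcet_winner : Prop := ∀ (ballots : List (List (String × Int))) (candidates : List String), Dom_get_condorcet_winner ballots candidates → Spec_get_condorcet_winner ballots candidates (get_condorcet_winner ballots candidates)


-- ===== LEMMAS AND PROOFS =====

-- b.get(x, 0) of one ballot, named for the proofs
def pvGet (b : List (String × Int)) (x : String) : Int := (PySem.Dict.mk b).getD x 0

-- A's 0/1-sum is a count of ballots
lemma pvSumGT_eq_countP (ballots : List (List (String × Int))) (x y : String) :
    pvSumGT ballots x y = ((ballots.countP (fun b => decide (pvGet b y < pvGet b x))) : Int) := by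
  have h : ∀ (l : List (List (String × Int))) (a : Int),
      l.foldl (fun acc b =>
        if (PySem.Dict.mk b).getD y 0 < (PySem.Dict.mk b).getD x 0 then acc + 1 else acc) a
      = a + ((l.countP (fun b => decide (pvGet b y < pvGet b x))) : Int) := by
    intro l
    induction l with
    | nil => simp
    | cons b rest ih =>
      intro a
      rw [List.foldl_cons, List.countP_cons, ih]
      by_cases hb : pvGet b y < pvGet b x
      · simp only [pvGet] at hb
        simp [pvGet, hb]
        omega
      · simp only [pvGet] at hb
        simp [pvGet, hb]
  simpa [pvSumGT] using h ballots 0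

-- one inner pass of B's matrix loop (the 'for o, so in scores' fold), key (c, o)
lemma pvInner_getD (f : String → Int) (L : List (String × Int)) (hL : ∀ q ∈ L, q.2 = f q.1)
    (p : String × Int) (w : PySem.Dict (String × String) Int) (c o : String) :
    (L.foldl (fun w q => if q.2 < p.2 then w.insert (p.1, q.1) (w.getD (p.1, q.1) 0 + 1) else w) w).getD (c, o) 0
      = w.getD (c, o) 0 + (if p.1 = c ∧ f o < p.2 then (((L.map Prod.fst).count o : Nat) : Int) else 0) := by
  induction L generalizing w with
  | nil => simp
  | cons q rest ih =>
    have hq : q.2 = f q.1 := hL q (by simp)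
    have hrest : ∀ r ∈ rest, r.2 = f r.1 := fun r hr => hL r (by simp [hr])
    rw [List.foldl_cons, ih hrest]
    by_cases hlt : q.2 < p.2
    · rw [if_pos hlt, PySem.Dict.getD_insert]
      by_cases ho : q.1 = o
      · have hfo : f o < p.2 := by rw [← ho, ← hq]; exact hlt
        by_cases hc : p.1 = c
        · have hkey : (c, o) = (p.1, q.1) := by rw [hc, ho]
          rw [if_pos hkey, hkey]
          simp [hc, hfo, ho]
          omega
        · have hkey : (c, o) ≠ (p.1, q.1) := by
            intro hk
            exact hc (Prod.mk.injEq .. ▸ hk).1.symm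
          rw [if_neg hkey]
          simp [hc]
      · have hkey : (c, o) ≠ (p.1, q.1) := by
          intro hk
          exact ho ((Prod.mk.injEq .. ▸ hk).2).symm
        rw [if_neg hkey]
        simp [ho]
    · rw [if_neg hlt]
      by_cases hcond : p.1 = c ∧ f o < p.2
      · have ho : q.1 ≠ o := by
          intro ho
          rw [← ho, ← hq] at hcond
          exact hlt hcond.2
        simp [hcond, ho]
      · simp [hcond]

-- the full double loop over scores for one ballot
lemma pvMiddle_getD (f : String → Int) (L M : List (String × Int))
    (hL : ∀ q ∈ L, q.2 = f q.1) (hM : ∀ p ∈ M, p.2 = f p.1)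
    (w : PySem.Dict (String × String) Int) (c o : String) :
    (M.foldl (fun w p =>
        L.foldl (fun w q => if q.2 < p.2 then w.insert (p.1, q.1) (w.getD (p.1, q.1) 0 + 1) else w) w) w).getD (c, o) 0
      = w.getD (c, o) 0 +
        (if f o < f c then (((M.map Prod.fst).count c : Nat) : Int) else 0) * (((L.map Prod.fst).count o : Nat) : Int) := by
  induction M generalizing w with
  | nil => simp
  | cons p rest ih =>
    have hp : p.2 = f p.1 := hM p (by simp)
    have hrest : ∀ r ∈ rest, r.2 = f r.1 := fun r hr => hM r (by simp [hr])
    rw [List.foldl_cons, ih hrest, pvInner_getD f L hL p w c o]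
    by_cases hc : p.1 = c
    · by_cases hfo : f o < f c
      · have hcond : p.1 = c ∧ f o < p.2 := ⟨hc, by rw [hp, hc]; exact hfo⟩
        simp [hcond, hfo]
        ring
      · have hcond : ¬ (p.1 = c ∧ f o < p.2) := by
          intro hk
          rw [hp, hc] at hk
          exact hfo hk.2
        simp [hcond, hfo]
    · by_cases hfo : f o < f c
      · simp [hc, hfo]
      · simp [hc, hfo]

-- characterisation of B's matrix: multiplicity-weighted pairwise win counts
lemma pvMatrix_getD (ballots : List (List (String × Int))) (candidates : List String) (c o : String) :
    (pvBMatrix ballots candidates).getD (c, o) 0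
      = ((candidates.count c : Nat) : Int) * ((candidates.count o : Nat) : Int) * pvSumGT ballots c o := by
  rw [pvSumGT_eq_countP]
  have h : ∀ (l : List (List (String × Int))) (w : PySem.Dict (String × String) Int),
      (l.foldl (fun w b =>
        (candidates.map (fun c => (c, (PySem.Dict.mk b).getD c 0))).foldl (fun w p =>
          (candidates.map (fun c => (c, (PySem.Dict.mk b).getD c 0))).foldl (fun w q =>
            if q.2 < p.2 then w.insert (p.1, q.1) (w.getD (p.1, q.1) 0 + 1) else w) w) w) w).getD (c, o) 0
      = w.getD (c, o) 0 + ((candidates.count c : Nat) : Int) * ((candidates.count o : Nat) : Int)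
          * ((l.countP (fun b => decide (pvGet b o < pvGet b c))) : Int) := by
    intro l
    induction l with
    | nil => simp
    | cons b rest ih =>
      intro w
      rw [List.foldl_cons, ih]
      have hmem : ∀ q ∈ candidates.map (fun c => (c, (PySem.Dict.mk b).getD c 0)),
          q.2 = (fun s => (PySem.Dict.mk b).getD s 0) q.1 := by
        intro q hq
        obtain ⟨s, _, rfl⟩ := List.mem_map.mp hq
        rfl
      rw [pvMiddle_getD (fun s => (PySem.Dict.mk b).getD s 0) _ _ hmem hmem w c o]
      have hfst : (candidates.map (fun c => (c, (PySem.Dict.mk b).getD c 0))).map Prod.fst = candidates := by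
        simp [Function.comp_def]
      rw [hfst, List.countP_cons]
      by_cases hb : pvGet b o < pvGet b c
      · have hb' : (PySem.Dict.mk b).getD o 0 < (PySem.Dict.mk b).getD c 0 := hb
        simp [pvGet, hb']
        ring
      · have hb' : ¬ (PySem.Dict.mk b).getD o 0 < (PySem.Dict.mk b).getD c 0 := hb
        simp [pvGet, hb']
  simpa [pvBMatrix] using h ballots PySem.Dict.empty

-- B's per-candidate check against the matrix equals A's inner loop
lemma pvCheck_eq (ballots : List (List (String × Int))) (candidates : List String) (cand : String)
    (hc : cand ∈ candidates) :
    ∀ l : List String, (∀ x ∈ l, x ∈ candidates) →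
      (l.all (fun opp => cand == opp ||
          decide ((pvBMatrix ballots candidates).getD (opp, cand) 0 < (pvBMatrix ballots candidates).getD (cand, opp) 0)))
        = pvAInner ballots cand l := by
  intro l
  induction l with
  | nil => simp [pvAInner]
  | cons opp rest ih =>
    intro hl
    have hopp : opp ∈ candidates := hl opp (by simp)
    have hrest : ∀ x ∈ rest, x ∈ candidates := fun x hx => hl x (by simp [hx])
    by_cases he : cand = opp
    · subst he
      simp [pvAInner, ih hrest]
    · have hbeq : (cand == opp) = false := by simp [he]
      have hpos : (0 : Int) < ((candidates.count cand : Nat) : Int) * ((candidates.count opp : Nat) : Int) := by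
        have h1 : 0 < candidates.count cand := List.count_pos_iff.mpr hc
        have h2 : 0 < candidates.count opp := List.count_pos_iff.mpr hopp
        positivity
      have hiff : ((pvBMatrix ballots candidates).getD (opp, cand) 0 < (pvBMatrix ballots candidates).getD (cand, opp) 0)
          ↔ (pvSumGT ballots opp cand < pvSumGT ballots cand opp) := by
        rw [pvMatrix_getD, pvMatrix_getD,
          mul_comm ((candidates.count opp : Nat) : Int) ((candidates.count cand : Nat) : Int)]
        constructor
        · intro h
          exact lt_of_mul_lt_mul_left h hpos.le
        · intro h
          exact mul_lt_mul_of_pos_left h hpos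
      by_cases hw : pvSumGT ballots opp cand < pvSumGT ballots cand opp
      · have : decide ((pvBMatrix ballots candidates).getD (opp, cand) 0 < (pvBMatrix ballots candidates).getD (cand, opp) 0) = true := by
          simp [hiff.mpr hw]
        simp [pvAInner, hbeq, this, hw, ih hrest]
      · have : decide ((pvBMatrix ballots candidates).getD (opp, cand) 0 < (pvBMatrix ballots candidates).getD (cand, opp) 0) = false := by
          simp [hiff, hw]
        simp [pvAInner, hbeq, this, hw]

-- A's outer loop equals B's find? over the matrix checks
lemma pvOuter_eq (ballots : List (List (String × Int))) (candidates : List String) :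
    ∀ l : List String, (∀ x ∈ l, x ∈ candidates) →
      pvAOuter ballots candidates l
        = l.find? (fun cand => pvBCheck (pvBMatrix ballots candidates) candidates cand) := by
  intro l
  induction l with
  | nil => simp [pvAOuter]
  | cons cand rest ih =>
    intro hl
    have hc : cand ∈ candidates := hl cand (by simp)
    have hrest : ∀ x ∈ rest, x ∈ candidates := fun x hx => hl x (by simp [hx])
    have hcheck : pvBCheck (pvBMatrix ballots candidates) candidates cand = pvAInner ballots cand candidates := by
      rw [pvBCheck]
      exact pvCheck_eq ballots candidates cand hc candidates (fun x hx => hx)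
    rw [List.find?_cons, pvAOuter, hcheck, ih hrest]
    by_cases hb : pvAInner ballots cand candidates
    · simp [hb]
    · simp [hb]

-- ===== VERDICT (by name: the statement is the Claim_ definition above) =====
theorem get_condorcet_winner_spec : Claim_equal_get_condorcet_winner := by
  intro ballots candidates _
  show get_condorcet_winner ballots candidates = get_condorcet_winner_alt ballots candidates
  rw [get_condorcet_winner, get_condorcet_winner_alt]
  exact pvOuter_eq ballots candidates candidates (fun x hx => hx)
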